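-- pv_equiv track=rewrite | github.com/wcx13811718006-lang/review-gated-research-systems | src/research_systems_showcase/local_ai/replay.py | _field_names
-- ===== SOURCE A (Python) =====
-- def _field_names(rows: list[dict[str, str]], reference_prefix: str, candidate_prefix: str) -> list[str]:
--     if not rows:
--         return []
--     columns = set(rows[0].keys())
--     reference_fields = {
--         column[len(reference_prefix) :]
--         for column in columns
--         if column.startswith(reference_prefix)
--     }
--     candidate_fields = {
--         column[len(candidate_prefix) :]
--         for column in columns
--         if column.startswith(candidate_prefix)
--     }
--     return sorted(reference_fields & candidate_fields)
-- ===== SOURCE B (Python) =====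
-- def _field_names(rows: list[dict[str, str]], reference_prefix: str, candidate_prefix: str) -> list[str]:
--     if not rows:
--         return []
--     columns = rows[0].keys()
--     names = []
--     for column in columns:
--         if column.startswith(reference_prefix):
--             name = column[len(reference_prefix):]
--             if candidate_prefix + name in columns:
--                 names.append(name)
--     names.sort()
--     return names
-- ===== Notes on version B (the rewrite author's own statement) =====
-- stated objective: alternative
-- what changed: Instead of materializing two stripped-suffix sets and intersecting them, B materializes nothing: one pass over the reference-prefixed columns probes the original key view directly for candidate_prefix + name (a semi-join by constructed key), collecting the hits (necessarily distinct) into a list that is sorted in place.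
import Mathlib
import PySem

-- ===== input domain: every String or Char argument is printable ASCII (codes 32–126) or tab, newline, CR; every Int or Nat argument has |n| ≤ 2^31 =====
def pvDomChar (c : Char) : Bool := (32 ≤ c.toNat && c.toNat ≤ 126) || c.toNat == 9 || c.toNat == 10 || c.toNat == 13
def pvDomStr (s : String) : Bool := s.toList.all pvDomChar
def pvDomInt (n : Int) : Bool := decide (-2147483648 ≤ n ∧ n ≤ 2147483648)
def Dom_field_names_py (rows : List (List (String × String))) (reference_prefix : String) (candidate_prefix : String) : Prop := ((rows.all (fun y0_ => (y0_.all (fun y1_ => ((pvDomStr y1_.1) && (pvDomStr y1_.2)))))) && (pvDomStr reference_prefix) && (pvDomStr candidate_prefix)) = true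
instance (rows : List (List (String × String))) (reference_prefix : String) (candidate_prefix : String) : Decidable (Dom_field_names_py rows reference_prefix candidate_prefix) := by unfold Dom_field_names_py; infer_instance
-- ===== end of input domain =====

-- B replaces A's two stripped-suffix sets + intersection by a single pass that probes the key list for candidate_prefix + name; alternative decomposition, same cost.


-- shared helper: Python's  column[len(p):]
def pyDropPrefix (p s : String) : String :=
  String.ofList (PySem.List.slice s.toList (some ((PySem.Str.len p : Int))) none)

-- Python's  p + s  on strings (exact: concatenation of the character lists)
def strConcat (p s : String) : String :=
  String.ofList (p.toList ++ s.toList)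

-- ===== PORT A =====
def field_names_py (rows : List (List (String × String))) (reference_prefix : String) (candidate_prefix : String) : List String :=
  match rows with
  | [] => []
  | r0 :: _ =>
    let columns : PySem.Set String := PySem.Set.ofList (PySem.Dict.ofList r0).keys
    let referenceFields : PySem.Set String :=
      PySem.Set.ofList ((columns.filter
        (fun c => PySem.Str.startswith c reference_prefix)).map (pyDropPrefix reference_prefix))
    let candidateFields : PySem.Set String :=
      PySem.Set.ofList ((columns.filter
        (fun c => PySem.Str.startswith c candidate_prefix)).map (pyDropPrefix candidate_prefix))
    PySem.List.sorted (PySem.Set.inter referenceFields candidateFields) (fun x => x) false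

-- ===== PORT B =====
def field_names_py_alt (rows : List (List (String × String))) (reference_prefix : String) (candidate_prefix : String) : List String :=
  match rows with
  | [] => []
  | r0 :: _ =>
    let columns := (PySem.Dict.ofList r0).keys
    let names := columns.foldl (fun acc column =>
      if PySem.Str.startswith column reference_prefix then
        if columns.contains (strConcat candidate_prefix (pyDropPrefix reference_prefix column))
        then acc ++ [pyDropPrefix reference_prefix column]
        else acc
      else acc) []
    PySem.List.sorted names (fun x => x) false

-- ===== PRECONDITION & SPEC =====
def Spec_field_names_py (rows : List (List (String × String))) (reference_prefix : String) (candidate_prefix : String) (out : List String) : Prop := out = field_names_py_alt rows reference_prefix candidate_prefix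
instance (rows : List (List (String × String))) (reference_prefix : String) (candidate_prefix : String) (out : List String) : Decidable (Spec_field_names_py rows reference_prefix candidate_prefix out) := by unfold Spec_field_names_py; infer_instance

-- ===== CLAIM (what is proved, stated in full; the proofs are below) =====
def Claim_equal_field_names_py : Prop := ∀ (rows : List (List (String × String))) (reference_prefix : String) (candidate_prefix : String), Dom_field_names_py rows reference_prefix candidate_prefix → Spec_field_names_py rows reference_prefix candidate_prefix (field_names_py rows reference_prefix candidate_prefix)

-- ===== LEMMAS AND PROOFS =====

-- a nested if with a shared else-branch is an if on the conjunction
theorem if_nest_and (A B : Bool) (x y : List String) :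
    (if A then if B then x else y else y) = (if A && B then x else y) := by
  cases A <;> cases B <;> simp

-- stripping the prefix back off a concatenation
theorem dropPrefix_concat (p x : String) : pyDropPrefix p (strConcat p x) = x := by
  simp [pyDropPrefix, strConcat, PySem.List.slice_from_natCast]

-- a column that starts with p is the concatenation of p and its stripped name
theorem concat_dropPrefix (p c : String) (h : PySem.Str.startswith c p = true) :
    strConcat p (pyDropPrefix p c) = c := by
  rw [PySem.Str.startswith_eq, PySem.Chars.startswith_iff] at h
  rcases h with ⟨t, ht⟩
  simp only [strConcat, pyDropPrefix, String.toList_ofList, PySem.List.slice_from_natCast,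
    PySem.Str.len_eq, ← ht, List.drop_left]
  rw [ht, String.ofList_toList]

-- the probe  cand + x in columns  succeeds iff some column is cand-prefixed with stripped name x
theorem contains_concat_iff (cols : List String) (p x : String) :
    cols.contains (strConcat p x) = true ↔
      ∃ c ∈ cols, PySem.Str.startswith c p = true ∧ pyDropPrefix p c = x := by
  constructor
  · intro h
    refine ⟨strConcat p x, by simpa using h, ?_, dropPrefix_concat p x⟩
    rw [PySem.Str.startswith_eq, PySem.Chars.startswith_iff]
    exact ⟨x.toList, by simp [strConcat]⟩
  · rintro ⟨c, hc, hs, hx⟩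
    have : strConcat p x = c := by rw [← hx]; exact concat_dropPrefix p c hs
    simpa [this] using hc

theorem field_names_py_spec : Claim_equal_field_names_py := by
  intro rows ref cand _
  unfold Spec_field_names_py field_names_py field_names_py_alt
  cases rows with
  | nil => rfl
  | cons r0 rest =>
    simp only []
    set cols := (PySem.Dict.ofList r0).keys with hcols
    have hnodcols : cols.Nodup := PySem.Dict.nodup_keys_ofList r0
    have hset : PySem.Set.ofList cols = cols := PySem.Set.ofList_eq_self_of_nodup cols hnodcols
    -- B's loop is a filter-then-map pass
    have hfold : (cols.foldl (fun acc column =>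
        if PySem.Str.startswith column ref then
          if cols.contains (strConcat cand (pyDropPrefix ref column))
          then acc ++ [pyDropPrefix ref column]
          else acc
        else acc) []) =
        (cols.filter (fun c => PySem.Str.startswith c ref &&
            cols.contains (strConcat cand (pyDropPrefix ref c)))).map (pyDropPrefix ref) := by
      have hbody : (fun (acc : List String) (column : String) =>
          if PySem.Str.startswith column ref then
            if cols.contains (strConcat cand (pyDropPrefix ref column))
            then acc ++ [pyDropPrefix ref column]
            else acc
          else acc) =
          (fun acc column =>
            if PySem.Str.startswith column ref &&
                cols.contains (strConcat cand (pyDropPrefix ref column))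
            then acc ++ [pyDropPrefix ref column]
            else acc) := by
        funext acc column
        exact if_nest_and (PySem.Str.startswith column ref) _ _ _
      rw [hbody, PySem.List.foldl_append_if]
      simp
    set LA := PySem.Set.inter
        (PySem.Set.ofList ((cols.filter (fun c => PySem.Str.startswith c ref)).map (pyDropPrefix ref)))
        (PySem.Set.ofList ((cols.filter (fun c => PySem.Str.startswith c cand)).map (pyDropPrefix cand))) with hLA
    set LB := (cols.filter (fun c => PySem.Str.startswith c ref &&
        cols.contains (strConcat cand (pyDropPrefix ref c)))).map (pyDropPrefix ref) with hLB
    have hmemA : ∀ x, x ∈ LA ↔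
        ((∃ c ∈ cols, PySem.Str.startswith c ref = true ∧ pyDropPrefix ref c = x) ∧
         (∃ c ∈ cols, PySem.Str.startswith c cand = true ∧ pyDropPrefix cand c = x)) := by
      intro x
      simp [hLA, PySem.Set.mem_inter, PySem.Set.mem_ofList, List.mem_map, List.mem_filter]
      constructor
      · rintro ⟨⟨c, ⟨hc, hs⟩, he⟩, ⟨c', ⟨hc', hs'⟩, he'⟩⟩
        exact ⟨⟨c, hc, by simpa using hs, he⟩, ⟨c', hc', by simpa using hs', he'⟩⟩
      · rintro ⟨⟨c, hc, hs, he⟩, ⟨c', hc', hs', he'⟩⟩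
        exact ⟨⟨c, ⟨hc, by simpa using hs⟩, he⟩, ⟨c', ⟨hc', by simpa using hs'⟩, he'⟩⟩
    have hmemB : ∀ x, x ∈ LB ↔
        ((∃ c ∈ cols, PySem.Str.startswith c ref = true ∧ pyDropPrefix ref c = x) ∧
         (∃ c ∈ cols, PySem.Str.startswith c cand = true ∧ pyDropPrefix cand c = x)) := by
      intro x
      constructor
      · intro hx
        rcases List.mem_map.mp hx with ⟨c, hcf, he⟩
        rcases List.mem_filter.mp hcf with ⟨hc, hp⟩
        obtain ⟨hs, hpr⟩ := Bool.and_eq_true_iff.mp hp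
        refine ⟨⟨c, hc, hs, he⟩, ?_⟩
        have := (contains_concat_iff cols cand (pyDropPrefix ref c)).mp hpr
        rw [he] at this
        exact this
      · rintro ⟨⟨c, hc, hs, he⟩, hcand⟩
        refine List.mem_map.mpr ⟨c, List.mem_filter.mpr ⟨hc, ?_⟩, he⟩
        refine Bool.and_eq_true_iff.mpr ⟨hs, ?_⟩
        apply (contains_concat_iff cols cand (pyDropPrefix ref c)).mpr
        rw [he]
        exact hcand
    have hndA : LA.Nodup := PySem.Set.nodup_inter _ _ (PySem.Set.nodup_ofList _)
    have hndB : LB.Nodup := by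
      apply List.Nodup.map_on _ (hnodcols.filter _)
      intro c1 h1 c2 h2 he
      have hs1 := (Bool.and_eq_true_iff.mp (List.mem_filter.mp h1).2).1
      have hs2 := (Bool.and_eq_true_iff.mp (List.mem_filter.mp h2).2).1
      calc c1 = strConcat ref (pyDropPrefix ref c1) := (concat_dropPrefix ref c1 hs1).symm
        _ = strConcat ref (pyDropPrefix ref c2) := by rw [he]
        _ = c2 := concat_dropPrefix ref c2 hs2
    have hperm : LA.Perm LB := by
      rw [List.perm_ext_iff_of_nodup hndA hndB]
      intro x; rw [hmemA x, hmemB x]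
    rw [hset, hfold]
    exact PySem.List.sorted_eq_sorted_of_perm _ _ _ (fun a b h => h) hperm
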